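-- pv_equiv track=rewrite | github.com/sahilrl/University | python/automorphic.py | trimorphic
-- ===== SOURCE A (Python) =====
-- def trimorphic(num, cube):
--     j = len(str(num))
--     while j > 0:
--         if num % 10 != cube % 10:
--             return False
--
--         else:
--             num //= 10
--             cube //= 10
--             j -= 1
--     return True
-- ===== SOURCE B (Python) =====
-- def trimorphic(num, cube):
--     m = 10 ** len(str(num))
--     return num % m == cube % m
-- ===== Notes on version B (the rewrite author's own statement) =====
-- stated objective: simpler
-- what changed: Replaced the per-digit stripping while-loop by a single closed-form modular test: with m = 10**len(str(num)), return num % m == cube % m (modding both sides reproduces the loop's floor-division behaviour on negatives).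
import Mathlib
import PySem

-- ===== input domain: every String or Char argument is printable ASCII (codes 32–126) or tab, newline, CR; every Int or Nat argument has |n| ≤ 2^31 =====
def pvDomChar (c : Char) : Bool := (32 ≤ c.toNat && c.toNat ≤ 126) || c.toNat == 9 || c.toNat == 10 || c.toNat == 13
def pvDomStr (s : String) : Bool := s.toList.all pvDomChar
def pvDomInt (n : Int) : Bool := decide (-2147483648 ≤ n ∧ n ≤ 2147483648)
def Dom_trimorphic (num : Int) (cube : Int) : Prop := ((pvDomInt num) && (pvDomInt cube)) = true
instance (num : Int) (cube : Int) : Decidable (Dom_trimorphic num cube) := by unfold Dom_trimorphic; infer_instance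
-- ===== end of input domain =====

-- B replaces A's per-digit stripping loop by a single modular-congruence test (simpler, closed form).


-- ===== PORT A =====
-- while j > 0: compare num % 10 with cube % 10, then num //= 10; cube //= 10; j -= 1
def trimorphicLoop : Nat → Int → Int → Bool
  | 0, _, _ => true
  | j + 1, num, cube =>
    if PySem.Int.mod num 10 ≠ PySem.Int.mod cube 10 then false
    else trimorphicLoop j (PySem.Int.floordiv num 10) (PySem.Int.floordiv cube 10)

def trimorphic (num : Int) (cube : Int) : Bool :=
  -- j = len(str(num)); len is nonnegative, so .toNat is exact
  trimorphicLoop (PySem.Str.len (PySem.Int.toStr num)).toNat num cube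

-- ===== PORT B =====
def trimorphic_alt (num : Int) (cube : Int) : Bool :=
  -- m = 10 ** len(str(num)); return num % m == cube % m
  decide (PySem.Int.mod num ((10 : Int) ^ (PySem.Str.len (PySem.Int.toStr num)).toNat)
        = PySem.Int.mod cube ((10 : Int) ^ (PySem.Str.len (PySem.Int.toStr num)).toNat))

-- ===== PRECONDITION & SPEC =====
def Spec_trimorphic (num : Int) (cube : Int) (out : Bool) : Prop := out = trimorphic_alt num cube
instance (num : Int) (cube : Int) (out : Bool) : Decidable (Spec_trimorphic num cube out) := by unfold Spec_trimorphic; infer_instance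

-- ===== CLAIM (what is proved, stated in full; the proofs are below) =====
def Claim_equal_trimorphic : Prop := ∀ (num : Int) (cube : Int), Dom_trimorphic num cube → Spec_trimorphic num cube (trimorphic num cube)

-- ===== LEMMAS AND PROOFS =====

-- Floor decomposition: a mod 10*M splits into the last digit and the rest mod M.
theorem pv_emod_mul_split (M a : Int) (hM : 0 < M) :
    a % (10 * M) = 10 * ((a / 10) % M) + a % 10 := by
  have h1 : 10 * (a / 10) + a % 10 = a := Int.mul_ediv_add_emod a 10
  have h2 : M * ((a / 10) / M) + (a / 10) % M = a / 10 := Int.mul_ediv_add_emod (a / 10) M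
  have hr1 : 0 ≤ a % 10 := Int.emod_nonneg a (by norm_num)
  have hr1' : a % 10 < 10 := Int.emod_lt_of_pos a (by norm_num)
  have hr2 : 0 ≤ (a / 10) % M := Int.emod_nonneg _ (by omega)
  have hr2' : (a / 10) % M < M := Int.emod_lt_of_pos _ hM
  have ha : a = (10 * ((a / 10) % M) + a % 10) + (10 * M) * ((a / 10) / M) := by
    linear_combination -h1 - 10 * h2
  have hlb : 0 ≤ 10 * ((a / 10) % M) + a % 10 := by linarith
  have hub : 10 * ((a / 10) % M) + a % 10 < 10 * M := by linarith
  conv_lhs => rw [ha, Int.add_mul_emod_self_left]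
  exact Int.emod_eq_of_lt hlb hub

-- Uniqueness of the (quotient, last-digit) decomposition, in omega-friendly form.
theorem pv_digits (x1 x2 r1 r2 : Int) (h1 : 0 ≤ r1) (h1' : r1 < 10) (h2 : 0 ≤ r2) (h2' : r2 < 10) :
    (10 * x1 + r1 = 10 * x2 + r2) ↔ (x1 = x2 ∧ r1 = r2) := by omega

theorem pv_loop_eq (j : Nat) (a b : Int) :
    trimorphicLoop j a b = decide (a % (10 : Int) ^ j = b % (10 : Int) ^ j) := by
  induction j generalizing a b with
  | zero => simp [trimorphicLoop]
  | succ j ih =>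
    have hM : (0 : Int) < 10 ^ j := by positivity
    have hsa := pv_emod_mul_split (10 ^ j) a hM
    have hsb := pv_emod_mul_split (10 ^ j) b hM
    have hra : 0 ≤ a % 10 := Int.emod_nonneg a (by norm_num)
    have hra' : a % 10 < 10 := Int.emod_lt_of_pos a (by norm_num)
    have hrb : 0 ≤ b % 10 := Int.emod_nonneg b (by norm_num)
    have hrb' : b % 10 < 10 := Int.emod_lt_of_pos b (by norm_num)
    have hpow : (10 : Int) ^ (j + 1) = 10 * 10 ^ j := by ring
    have key := pv_digits ((a / 10) % 10 ^ j) ((b / 10) % 10 ^ j) (a % 10) (b % 10) hra hra' hrb hrb'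
    rw [trimorphicLoop,
        PySem.Int.mod_eq_emod_of_pos (by norm_num), PySem.Int.mod_eq_emod_of_pos (by norm_num),
        PySem.Int.floordiv_eq_ediv_of_pos (by norm_num), PySem.Int.floordiv_eq_ediv_of_pos (by norm_num),
        ih, hpow, hsa, hsb]
    simp only [key]
    by_cases h : a % 10 = b % 10
    · rw [if_neg (not_not_intro h)]
      simp [h]
    · rw [if_pos h]
      simp [h]

-- ===== VERDICT (by name: the statement is the Claim_ definition above) =====
theorem trimorphic_spec : Claim_equal_trimorphic := by
  intro num cube _
  unfold Spec_trimorphic trimorphic trimorphic_alt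
  have hm : (0 : Int) < 10 ^ (PySem.Str.len (PySem.Int.toStr num)).toNat := by positivity
  rw [pv_loop_eq, PySem.Int.mod_eq_emod_of_pos hm, PySem.Int.mod_eq_emod_of_pos hm]
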